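-- pv_equiv track=rewrite | github.com/open-run-org/archive | scripts/materialize_docs.py | latest_by_post
-- ===== SOURCE A (Python) =====
-- def latest_by_post(items):
--     d = {}
--     for it in items:
--         k = (it["sub"], it["post_id"])
--         v = d.get(k)
--         if not v or it["capture"] > v["capture"]:
--             d[k] = it
--     return list(d.values())
-- ===== SOURCE B (Python) =====
-- def latest_by_post(items):
--     # group all items by (sub, post_id) in first-appearance key order,
--     # then reduce each group to its first capture-maximal item
--     groups = {}
--     for it in items:
--         k = (it["sub"], it["post_id"])
--         groups[k] = groups.get(k, []) + [it]
--     out = []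
--     for g in groups.values():
--         best = g[0]
--         for x in g[1:]:
--             if x["capture"] > best["capture"]:
--                 best = x
--         out.append(best)
--     return out
-- ===== Notes on version B (the rewrite author's own statement) =====
-- stated objective: alternative
-- what changed: B replaces A's running-best dict (compare-and-overwrite inside the loop) by a group-then-reduce decomposition: one pass builds a dict from (sub, post_id) to the list of all items with that key, then a second pass takes the first capture-maximal item of each group via max(..., key=...).
import Mathlib
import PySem

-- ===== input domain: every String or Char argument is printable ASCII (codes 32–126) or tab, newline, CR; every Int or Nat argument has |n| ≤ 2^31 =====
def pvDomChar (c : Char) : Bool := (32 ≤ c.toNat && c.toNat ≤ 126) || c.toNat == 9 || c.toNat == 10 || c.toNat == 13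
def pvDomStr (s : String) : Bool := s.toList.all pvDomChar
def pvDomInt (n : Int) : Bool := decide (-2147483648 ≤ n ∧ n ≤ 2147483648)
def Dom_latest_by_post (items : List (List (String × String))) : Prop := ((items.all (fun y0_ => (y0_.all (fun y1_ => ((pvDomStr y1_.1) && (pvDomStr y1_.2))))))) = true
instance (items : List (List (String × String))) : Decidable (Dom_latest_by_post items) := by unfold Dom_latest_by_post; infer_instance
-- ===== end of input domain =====

-- B is the same task by a different decomposition: group items by (sub, post_id), then reduce
-- each group to its first capture-maximal item (A instead keeps a running best while looping).

-- helpers both Pythons share verbatim: an item dict is an association list, it["x"] is the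
-- first match; '.getD ""' is a total encoding of KeyError (Pre_ excludes the raising inputs)
def pvKeyOf (it : List (String × String)) : String × String :=
  ((it.lookup "sub").getD "", (it.lookup "post_id").getD "")
def pvCapOf (it : List (String × String)) : String :=
  (it.lookup "capture").getD ""

-- ===== PORT A =====
-- 'not v' on a dict v is 'v = []' (None or the empty dict are falsy); 'x > y' on str is 'y < x'
def latest_by_post (items : List (List (String × String))) : List (List (String × String)) :=
  (items.foldl (fun d it =>
      match d.get? (pvKeyOf it) with
      | none => d.insert (pvKeyOf it) it
      | some v => if v = [] ∨ pvCapOf v < pvCapOf it then d.insert (pvKeyOf it) it else d)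
    PySem.Dict.empty).values

-- ===== PORT B =====
-- Source B's inner reduction: best = g[0]; for x in g[1:]: replace best on strictly greater capture
-- (g[0] is PySem.List.pyGet?, '.getD []' encodes the IndexError on an empty g — the groups the
-- loop below builds are never empty; g[1:] is PySem.List.slice)
def pvPick (g : List (List (String × String))) : List (String × String) :=
  (PySem.List.slice g (some 1) none).foldl
    (fun best x => if pvCapOf best < pvCapOf x then x else best)
    ((PySem.List.pyGet? g 0).getD [])

-- groups[k] = groups.get(k, []) + [it]  is  Dict.modify k [] (· ++ [it])
def latest_by_post_alt (items : List (List (String × String))) : List (List (String × String)) :=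
  ((items.foldl (fun g it => g.modify (pvKeyOf it) [] (· ++ [it]))
      (PySem.Dict.empty : PySem.Dict (String × String) (List (List (String × String))))).values).map
    pvPick

-- ===== PRECONDITION & SPEC =====
-- Pre_ excludes exactly the inputs where A raises KeyError: an item missing "sub" or "post_id",
-- or an item missing "capture" whose (sub, post_id) key occurs at least twice
def Pre_latest_by_post (items : List (List (String × String))) : Prop :=
  ∀ it ∈ items, (it.lookup "sub").isSome ∧ (it.lookup "post_id").isSome ∧
    (2 ≤ items.countP (fun j => pvKeyOf j == pvKeyOf it) → (it.lookup "capture").isSome)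
instance (items : List (List (String × String))) : Decidable (Pre_latest_by_post items) := by
  unfold Pre_latest_by_post; infer_instance

def pvWitness_latest_by_post : (List (List (String × String))) :=
  [[("sub", "a"), ("post_id", "1"), ("capture", "2020")],
   [("sub", "a"), ("post_id", "1"), ("capture", "2021")]]

def Spec_latest_by_post (items : List (List (String × String))) (out : List (List (String × String))) : Prop := out = latest_by_post_alt items
instance (items : List (List (String × String))) (out : List (List (String × String))) : Decidable (Spec_latest_by_post items out) := by unfold Spec_latest_by_post; infer_instance

-- ===== CLAIM (what is proved, stated in full; the proofs are below) =====
def Claim_equal_latest_by_post : Prop := ∀ (items : List (List (String × String))), Dom_latest_by_post items → Pre_latest_by_post items → Spec_latest_by_post items (latest_by_post items)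

-- ===== LEMMAS AND PROOFS =====

-- B's per-group reduction, cons form and facts about it
theorem pv_pick_cons (h : List (String × String)) (t : List (List (String × String))) :
    pvPick (h :: t) = t.foldl (fun best x => if pvCapOf best < pvCapOf x then x else best) h := by
  unfold pvPick
  rw [PySem.List.slice_from _ (by norm_num)]
  have h0 : (PySem.List.pyGet? (h :: t) 0).getD [] = h := by simp [pysem]
  rw [h0]
  simp only [Int.toNat_one, List.drop_succ_cons, List.drop_zero]

theorem pv_pick_singleton (it : List (String × String)) : pvPick [it] = it := by
  rw [pv_pick_cons]
  rfl

theorem pv_fold_mem (t : List (List (String × String))) (a : List (String × String)) :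
    t.foldl (fun best x => if pvCapOf best < pvCapOf x then x else best) a = a
      ∨ t.foldl (fun best x => if pvCapOf best < pvCapOf x then x else best) a ∈ t := by
  induction t generalizing a with
  | nil => exact Or.inl rfl
  | cons x t ih =>
    simp only [List.foldl_cons]
    rcases ih (if pvCapOf a < pvCapOf x then x else a) with h | h
    · rw [h]
      by_cases hc : pvCapOf a < pvCapOf x
      · rw [if_pos hc]; exact Or.inr List.mem_cons_self
      · rw [if_neg hc]; exact Or.inl rfl
    · exact Or.inr (List.mem_cons_of_mem _ h)

theorem pv_pick_mem (g : List (List (String × String))) (hg : g ≠ []) : pvPick g ∈ g := by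
  obtain ⟨h, t, rfl⟩ := List.exists_cons_of_ne_nil hg
  rw [pv_pick_cons]
  rcases pv_fold_mem t h with he | he
  · rw [he]; exact List.mem_cons_self
  · exact List.mem_cons_of_mem _ he

theorem pv_pick_append (g : List (List (String × String))) (it : List (String × String))
    (hg : g ≠ []) :
    pvPick (g ++ [it]) = if pvCapOf (pvPick g) < pvCapOf it then it else pvPick g := by
  obtain ⟨h, t, rfl⟩ := List.exists_cons_of_ne_nil hg
  rw [List.cons_append, pv_pick_cons, pv_pick_cons, List.foldl_append, List.foldl_cons,
      List.foldl_nil]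

-- lookup commutes with mapping a function over the values of an items list
theorem pv_get?_mk_map (f : List (List (String × String)) → List (String × String))
    (l : List ((String × String) × List (List (String × String))))
    (k : String × String) :
    (PySem.Dict.mk (l.map (fun p => (p.1, f p.2)))).get? k
      = ((PySem.Dict.mk l).get? k).map f := by
  induction l with
  | nil => rfl
  | cons p t ih =>
    obtain ⟨k1, v1⟩ := p
    simp only [List.map_cons, PySem.Dict.get?_mk_cons]
    by_cases h : (k1 == k) = true
    · simp [h]
    · simp [h, ih]

-- the loop invariant: A's dict is B's group dict with pvPick applied to every value
theorem pv_inv (l : List (List (String × String)))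
    (hl : ∀ it ∈ l, it ≠ [])
    (gd : PySem.Dict (String × String) (List (List (String × String))))
    (hnd : gd.keys.Nodup)
    (hg : ∀ p ∈ gd.items, p.2 ≠ [] ∧ ∀ x ∈ p.2, x ≠ []) :
    l.foldl (fun d it =>
        match d.get? (pvKeyOf it) with
        | none => d.insert (pvKeyOf it) it
        | some v => if v = [] ∨ pvCapOf v < pvCapOf it then d.insert (pvKeyOf it) it else d)
      (PySem.Dict.mk (gd.items.map (fun p => (p.1, pvPick p.2))))
    = PySem.Dict.mk
        ((l.foldl (fun g it => g.modify (pvKeyOf it) [] (· ++ [it])) gd).items.map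
          (fun p => (p.1, pvPick p.2))) := by
  induction l generalizing gd with
  | nil => simp
  | cons it t ih =>
    have hit : it ≠ [] := hl it (List.mem_cons_self)
    have hlt : ∀ x ∈ t, x ≠ [] := fun x hx => hl x (List.mem_cons_of_mem _ hx)
    set k := pvKeyOf it with hk
    simp only [List.foldl_cons]
    rw [pv_get?_mk_map]
    cases hgk : gd.get? k with
    | none =>
      -- fresh key: both dicts append their new entry at the end
      have hc : gd.contains k = false := by
        have := PySem.Dict.contains_eq_isSome_get? gd k
        rw [hgk] at this; simpa using this
      have hB : gd.modify k [] (· ++ [it])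
          = PySem.Dict.mk (gd.items ++ [(k, [it])]) := by
        simp [PySem.Dict.modify, PySem.Dict.insert, hc,
              PySem.Dict.getD_of_not_contains gd [] hc]
      have hA : (PySem.Dict.mk (gd.items.map (fun p => (p.1, pvPick p.2)))).insert k it
          = PySem.Dict.mk (gd.items.map (fun p => (p.1, pvPick p.2)) ++ [(k, it)]) := by
        have hc' : (PySem.Dict.mk (gd.items.map (fun p => (p.1, pvPick p.2)))).contains k = false := by
          have := PySem.Dict.contains_eq_isSome_get?
            (PySem.Dict.mk (gd.items.map (fun p => (p.1, pvPick p.2)))) k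
          rw [pv_get?_mk_map, hgk] at this; simpa using this
        simp [PySem.Dict.insert, hc']
      have hnd' : (gd.modify k [] (· ++ [it])).keys.Nodup := by
        simpa [PySem.Dict.modify]
          using PySem.Dict.nodup_keys_insert gd k ((gd.getD k []) ++ [it]) hnd
      have hg' : ∀ p ∈ (gd.modify k [] (· ++ [it])).items, p.2 ≠ [] ∧ ∀ x ∈ p.2, x ≠ [] := by
        intro p hp
        rw [hB] at hp
        rcases List.mem_append.mp hp with h | h
        · exact hg p h
        · simp only [List.mem_singleton] at h
          subst h
          exact ⟨by simp, by simpa using hit⟩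
      simp only [Option.map_none]
      rw [hB]
      have htail := ih hlt (gd.modify k [] (· ++ [it])) hnd' hg'
      rw [hB] at htail
      rw [← htail, hA]
      congr 2
      simp [pv_pick_singleton]
    | some grp =>
      -- existing key: B appends to the group in place, A compares with the group's best
      have hmem : (k, grp) ∈ gd.items := PySem.Dict.mem_items_of_get?_eq_some gd hgk
      have hgrp := hg _ hmem
      have hgrpne : grp ≠ [] := hgrp.1
      have hbne : pvPick grp ≠ [] := hgrp.2 _ (pv_pick_mem grp hgrpne)
      have hc : gd.contains k = true := by
        have := PySem.Dict.contains_eq_isSome_get? gd k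
        rw [hgk] at this; simpa using this
      have hB : gd.modify k [] (· ++ [it])
          = PySem.Dict.mk (gd.items.map (fun p => if p.1 == k then (k, grp ++ [it]) else p)) := by
        simp [PySem.Dict.modify, PySem.Dict.insert, hc,
              PySem.Dict.getD_of_get?_eq_some gd [] hgk]
      have huniq : ∀ p ∈ gd.items, p.1 = k → p.2 = grp := by
        intro p hp hpk
        have h := PySem.Dict.get?_of_mem_items gd (k := p.1) (v := p.2) hp hnd
        rw [hpk, hgk] at h
        exact (Option.some_injective _ h).symm
      have hnd' : (gd.modify k [] (· ++ [it])).keys.Nodup := by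
        simpa [PySem.Dict.modify]
          using PySem.Dict.nodup_keys_insert gd k ((gd.getD k []) ++ [it]) hnd
      have hg' : ∀ p ∈ (gd.modify k [] (· ++ [it])).items, p.2 ≠ [] ∧ ∀ x ∈ p.2, x ≠ [] := by
        intro p hp
        rw [hB] at hp
        rcases List.mem_map.mp hp with ⟨q, hq, hqe⟩
        by_cases hq1 : (q.1 == k) = true
        · rw [if_pos hq1] at hqe
          subst hqe
          refine ⟨by simp, ?_⟩
          intro x hx
          rcases List.mem_append.mp hx with h | h
          · exact hgrp.2 x h
          · simp only [List.mem_singleton] at h; subst h; exact hit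
        · rw [if_neg hq1] at hqe; subst hqe; exact hg q hq
      simp only [Option.map_some]
      have htail := ih hlt (gd.modify k [] (· ++ [it])) hnd' hg'
      rw [← htail, hB]
      -- the two start dicts of the tail fold coincide
      have hstart :
          (if pvPick grp = [] ∨ pvCapOf (pvPick grp) < pvCapOf it then
              (PySem.Dict.mk (gd.items.map (fun p => (p.1, pvPick p.2)))).insert k it
            else PySem.Dict.mk (gd.items.map (fun p => (p.1, pvPick p.2))))
          = PySem.Dict.mk
              ((gd.items.map (fun p => if p.1 == k then (k, grp ++ [it]) else p)).map
                (fun p => (p.1, pvPick p.2))) := by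
        by_cases hcond : pvCapOf (pvPick grp) < pvCapOf it
        · rw [if_pos (Or.inr hcond)]
          have hcA : (PySem.Dict.mk (gd.items.map (fun p => (p.1, pvPick p.2)))).contains k = true := by
            have := PySem.Dict.contains_eq_isSome_get?
              (PySem.Dict.mk (gd.items.map (fun p => (p.1, pvPick p.2)))) k
            rw [pv_get?_mk_map, hgk] at this; simpa using this
          simp only [PySem.Dict.insert, hcA, if_pos]
          congr 1
          simp only [List.map_map]
          apply List.map_congr_left
          intro p hp
          by_cases hpk : (p.1 == k) = true
          · have hpe : p.2 = grp := huniq p hp (by simpa using hpk)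
            simp [Function.comp, hpk, pv_pick_append grp it hgrpne, hcond]
          · simp [Function.comp, hpk]
        · have hnot : ¬(pvPick grp = [] ∨ pvCapOf (pvPick grp) < pvCapOf it) := by
            rintro (h | h)
            · exact hbne h
            · exact hcond h
          rw [if_neg hnot]
          congr 1
          simp only [List.map_map]
          refine (List.map_congr_left ?_).symm
          intro p hp
          by_cases hpk : (p.1 == k) = true
          · have hpe : p.2 = grp := huniq p hp (by simpa using hpk)
            have hpk' : p.1 = k := by simpa using hpk
            simp [Function.comp, hpe, hpk', pv_pick_append grp it hgrpne, hcond]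
          · simp [Function.comp, hpk]
      rw [hstart]

-- ===== VERDICT (by name: the statement is the Claim_ definition above) =====
theorem latest_by_post_spec : Claim_equal_latest_by_post := by
  intro items _ hpre
  unfold Spec_latest_by_post latest_by_post latest_by_post_alt
  have hne : ∀ it ∈ items, it ≠ [] := by
    intro it hit h
    have := (hpre it hit).1
    rw [h] at this
    simp [List.lookup] at this
  have hmain := pv_inv items hne PySem.Dict.empty (by simp [PySem.Dict.empty]) (by simp [PySem.Dict.empty])
  have hempty : (PySem.Dict.mk
      (((PySem.Dict.empty : PySem.Dict (String × String) (List (List (String × String)))).items).map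
        (fun p => (p.1, pvPick p.2)))) = PySem.Dict.empty := by
    simp [PySem.Dict.empty]
  rw [hempty] at hmain
  rw [hmain]
  simp [PySem.Dict.values, List.map_map, Function.comp]
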